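-- pv_equiv track=rewrite | github.com/sinhakrishnendu/babappasnake | babappasnake/scripts/strip_terminal_stop_codon.py | strip_terminal_stop_in_aligned_seq
-- ===== SOURCE A (Python) =====
-- STOP_CODONS = {"TAA", "TAG", "TGA"}
--
-- def strip_terminal_stop_in_aligned_seq(aligned_seq: str, rec_id: str) -> tuple[str, bool]:
--     chars = list(aligned_seq.upper())
--     nongap_idx = [i for i, c in enumerate(chars) if c != "-"]
--     ungapped = "".join(chars[i] for i in nongap_idx)
--
--     if len(ungapped) % 3 != 0:
--         raise RuntimeError(
--             f"Sequence {rec_id} has ungapped length {len(ungapped)} not divisible by 3; cannot process codon alignment safely"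
--         )
--
--     if len(ungapped) >= 3 and ungapped[-3:] in STOP_CODONS:
--         for idx in nongap_idx[-3:]:
--             chars[idx] = "-"
--         return "".join(chars), True
--
--     return "".join(chars), False
-- ===== SOURCE B (Python) =====
-- STOP_CODONS = {"TAA", "TAG", "TGA"}
--
-- def strip_terminal_stop_in_aligned_seq(aligned_seq: str, rec_id: str) -> tuple[str, bool]:
--     up = aligned_seq.upper()
--     ungapped = up.replace("-", "")
--
--     if len(ungapped) % 3 != 0:
--         raise RuntimeError(
--             f"Sequence {rec_id} has ungapped length {len(ungapped)} not divisible by 3; cannot process codon alignment safely"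
--         )
--
--     if len(ungapped) >= 3 and ungapped[-3:] in STOP_CODONS:
--         # gap the last three non-gap characters by one backward pass
--         out = []
--         todo = 3
--         for c in reversed(up):
--             if todo and c != "-":
--                 out.append("-")
--                 todo -= 1
--             else:
--                 out.append(c)
--         return "".join(reversed(out)), True
--
--     return up, False
-- ===== Notes on version B (the rewrite author's own statement) =====
-- stated objective: simpler
-- what changed: B drops A's non-gap index list entirely: it gets the ungapped sequence with str.replace for the divisibility and stop-codon tests, and when a terminal stop is found it gaps the last three non-gap characters by a single backward pass over the string instead of assigning through the index list's last-three slice.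
import Mathlib
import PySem

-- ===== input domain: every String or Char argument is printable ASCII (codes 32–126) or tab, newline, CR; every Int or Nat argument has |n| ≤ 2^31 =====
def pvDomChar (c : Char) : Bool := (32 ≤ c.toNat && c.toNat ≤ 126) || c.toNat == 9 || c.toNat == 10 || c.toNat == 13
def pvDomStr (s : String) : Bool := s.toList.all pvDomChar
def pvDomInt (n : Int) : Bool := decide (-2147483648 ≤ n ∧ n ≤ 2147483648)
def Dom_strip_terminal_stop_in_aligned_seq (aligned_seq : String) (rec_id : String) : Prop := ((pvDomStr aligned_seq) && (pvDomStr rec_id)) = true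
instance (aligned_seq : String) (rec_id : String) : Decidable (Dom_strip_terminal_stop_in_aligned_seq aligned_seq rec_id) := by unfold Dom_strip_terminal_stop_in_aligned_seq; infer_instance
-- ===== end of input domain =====

-- B replaces A's non-gap index list by str.replace (for the tests) and one backward
-- gapping pass (for the rewrite); same cost, simpler decomposition.

def stopCodons : List (List Char) := [['T','A','A'], ['T','A','G'], ['T','G','A']]

-- ===== PORT A =====
-- the comprehension [i for i, c in enumerate(chars) if c != "-"]
def intI (cs : List Char) : List Int :=
  ((PySem.List.enumerate cs).filter (fun p => p.2 ≠ '-')).map (·.1)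


-- Transliteration of A. Where A raises RuntimeError (ungapped length not divisible
-- by 3) the port returns ("", false); those inputs are excluded by Pre_.
-- "".join(chars[i] for i in nongap_idx) is ported index by index via pyGetD
-- (every i in nongap_idx is a valid index, so the default is never used).
def strip_terminal_stop_in_aligned_seq (aligned_seq : String) (rec_id : String) : String × Bool :=
  let chars := (PySem.Str.upper aligned_seq).toList
  let nongap_idx := intI chars
  let ungapped := nongap_idx.map (fun i => PySem.List.pyGetD chars i ' ')
  if ungapped.length % 3 ≠ 0 then
    ("", false)  -- RuntimeError in Python; outside Pre_
  else if 3 ≤ ungapped.length ∧ PySem.List.slice ungapped (some (-3)) none ∈ stopCodons then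
    let chars2 := (PySem.List.slice nongap_idx (some (-3)) none).foldl
      (fun cs idx => PySem.List.pySetD cs idx '-') chars
    (String.ofList chars2, true)
  else
    (String.ofList chars, false)

-- ===== PORT B =====
-- gapTail k rev: the backward pass of Source B over the reversed character list —
-- replace the first k non-gap characters by '-', keep the rest.
def gapTail : Nat → List Char → List Char
  | 0, l => l
  | _ + 1, [] => []
  | k + 1, c :: t => if c = '-' then c :: gapTail (k + 1) t else '-' :: gapTail k t

-- Transliteration of Source B; up.replace("-","") is PySem.Chars.replace on the code
-- points, and the membership / slice tests are done on the character list.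
-- Where Source B raises RuntimeError the port returns ("", false); outside Pre_.
def strip_terminal_stop_in_aligned_seq_alt (aligned_seq : String) (rec_id : String) : String × Bool :=
  let up := PySem.Str.upper aligned_seq
  let ungapped := PySem.Chars.replace up.toList ['-'] []
  if ungapped.length % 3 ≠ 0 then
    ("", false)  -- RuntimeError in Python; outside Pre_
  else if 3 ≤ ungapped.length ∧ PySem.List.slice ungapped (some (-3)) none ∈ stopCodons then
    (String.ofList (gapTail 3 up.toList.reverse).reverse, true)
  else
    (up, false)

-- ===== PRECONDITION & SPEC =====
-- Pre_ excludes exactly the inputs on which A (and B) raise RuntimeError: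
-- the ungapped (gap-free) length of the uppercased sequence is not divisible by 3.
def Pre_strip_terminal_stop_in_aligned_seq (aligned_seq : String) (rec_id : String) : Prop :=
  ((PySem.Str.upper aligned_seq).toList.filter (fun c => c ≠ '-')).length % 3 = 0
instance (aligned_seq : String) (rec_id : String) : Decidable (Pre_strip_terminal_stop_in_aligned_seq aligned_seq rec_id) := by unfold Pre_strip_terminal_stop_in_aligned_seq; infer_instance

def pvWitness_strip_terminal_stop_in_aligned_seq : String × String := ("ATG---TAA", "rec1")

def Spec_strip_terminal_stop_in_aligned_seq (aligned_seq : String) (rec_id : String) (out : String × Bool) : Prop := out = strip_terminal_stop_in_aligned_seq_alt aligned_seq rec_id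
instance (aligned_seq : String) (rec_id : String) (out : String × Bool) : Decidable (Spec_strip_terminal_stop_in_aligned_seq aligned_seq rec_id out) := by unfold Spec_strip_terminal_stop_in_aligned_seq; infer_instance

-- ===== CLAIM (what is proved, stated in full; the proofs are below) =====
def Claim_equal_strip_terminal_stop_in_aligned_seq : Prop := ∀ (aligned_seq : String) (rec_id : String), Dom_strip_terminal_stop_in_aligned_seq aligned_seq rec_id → Pre_strip_terminal_stop_in_aligned_seq aligned_seq rec_id → Spec_strip_terminal_stop_in_aligned_seq aligned_seq rec_id (strip_terminal_stop_in_aligned_seq aligned_seq rec_id)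

-- ===== LEMMAS AND PROOFS =====

lemma intI_append_singleton (cs : List Char) (c : Char) :
    intI (cs ++ [c]) = intI cs ++ (if c ≠ '-' then [(cs.length : Int)] else []) := by
  unfold intI
  rw [PySem.List.enumerate_append, List.filter_append, List.map_append]
  congr 1
  by_cases h : c = '-' <;>
    simp [PySem.List.enumerate_cons, PySem.List.enumerate_nil, h]

lemma mem_intI_bound {cs : List Char} {i : Int} (h : i ∈ intI cs) :
    0 ≤ i ∧ i < (cs.length : Int) := by
  unfold intI at h
  obtain ⟨p, hp, rfl⟩ := List.mem_map.mp h
  obtain ⟨hp1, -⟩ := List.mem_filter.mp hp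
  obtain ⟨k, hk, rfl⟩ := (PySem.List.mem_enumerate_iff _ _ _).mp hp1
  simp
  omega

-- A's join over nongap_idx is exactly the gap-filtered list
lemma ungapA (cs : List Char) :
    (intI cs).map (fun i => PySem.List.pyGetD cs i ' ') = cs.filter (fun c => c ≠ '-') := by
  induction cs using List.reverseRecOn with
  | nil => simp [intI, PySem.List.enumerate_nil]
  | append_singleton cs c ih =>
    rw [intI_append_singleton, List.map_append, List.filter_append]
    congr 1
    · rw [← ih]
      refine List.map_congr_left (fun i hi => ?_)
      obtain ⟨h0, hlt⟩ := mem_intI_bound hi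
      rw [PySem.List.pyGetD_eq_getElem _ _ h0 (by simp; omega),
          PySem.List.pyGetD_eq_getElem _ _ h0 (by omega),
          List.getElem_append_left (by omega)]
    · by_cases h : c = '-'
      · simp [h]
      · simp only [h, ne_eq, not_false_eq_true, if_true, List.map_cons, List.map_nil]
        rw [PySem.List.pyGetD_eq_getElem _ _ (by omega) (by simp)]
        simp [h]

lemma length_intI (cs : List Char) :
    (intI cs).length = (cs.filter (fun c => c ≠ '-')).length := by
  have := congrArg List.length (ungapA cs)
  simpa using this

-- B's replace is the same gap-filtered list
lemma replace_go_dash (fuel : Nat) : ∀ (l acc : List Char), l.length ≤ fuel →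
    PySem.Chars.replace.go ['-'] [] fuel l acc = acc.reverse ++ l.filter (fun c => c ≠ '-') := by
  induction fuel with
  | zero =>
    intro l acc hl
    have : l = [] := List.eq_nil_of_length_eq_zero (by omega)
    subst this
    rw [PySem.Chars.replace.go]
    simp
  | succ fuel ih =>
    intro l acc hl
    cases l with
    | nil =>
      rw [PySem.Chars.replace.go]
      simp
      omega
    | cons c t =>
      rw [PySem.Chars.replace.go]
      by_cases hc : c = '-'
      · rw [if_pos (by simp [List.isPrefixOf, hc])]
        rw [ih _ _ (by simpa using Nat.le_of_succ_le_succ hl)]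
        simp [hc]
      · rw [if_neg (by simp [List.isPrefixOf]; exact fun h => hc h.symm)]
        rw [ih _ _ (by simpa using Nat.le_of_succ_le_succ hl)]
        simp [hc]

lemma replace_dash (cs : List Char) :
    PySem.Chars.replace cs ['-'] [] = cs.filter (fun c => c ≠ '-') := by
  rw [PySem.Chars.replace, if_neg (by simp)]
  rw [replace_go_dash cs.length cs [] (le_refl _)]
  simp

-- setting through a list of in-range indices commutes with appending a last char
lemma foldl_set_append (J : List Int) (cs : List Char) (c : Char)
    (hJ : ∀ i ∈ J, 0 ≤ i ∧ i < (cs.length : Int)) :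
    J.foldl (fun a i => PySem.List.pySetD a i '-') (cs ++ [c])
      = J.foldl (fun a i => PySem.List.pySetD a i '-') cs ++ [c] := by
  induction J generalizing cs with
  | nil => simp
  | cons i J ih =>
    obtain ⟨h0, hlt⟩ := hJ i (by simp)
    have hstep : PySem.List.pySetD (cs ++ [c]) i '-' = PySem.List.pySetD cs i '-' ++ [c] := by
      rw [PySem.List.pySetD_of_nonneg _ _ h0, PySem.List.pySetD_of_nonneg _ _ h0,
          List.set_append, if_pos (by omega)]
    rw [List.foldl_cons, List.foldl_cons, hstep, ih]
    intro j hj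
    have := hJ j (by simp [hj])
    rw [PySem.List.pySetD_of_nonneg _ _ h0]
    simpa using this

lemma gapTail_dash (k : Nat) (l : List Char) :
    gapTail k ('-' :: l) = '-' :: gapTail k l := by
  cases k <;> simp [gapTail]

lemma gapTail_length (k : Nat) (l : List Char) : (gapTail k l).length = l.length := by
  induction l generalizing k with
  | nil => cases k <;> rfl
  | cons c t ih =>
    cases k with
    | zero => rfl
    | succ k' =>
      simp only [gapTail]
      split <;> simp [ih]

lemma foldl_set_length (J : List Int) (cs : List Char) :
    (J.foldl (fun a i => PySem.List.pySetD a i '-') cs).length = cs.length := by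
  induction J generalizing cs with
  | nil => rfl
  | cons i J ih => rw [List.foldl_cons, ih, PySem.List.length_pySetD]

-- key lemma: A's index-slice assignment = B's backward gapping pass
lemma key (cs : List Char) (k : Nat) (hk : k ≤ (cs.filter (fun c => c ≠ '-')).length) :
    ((intI cs).drop ((intI cs).length - k)).foldl
        (fun a i => PySem.List.pySetD a i '-') cs
      = (gapTail k cs.reverse).reverse := by
  induction cs using List.reverseRecOn generalizing k with
  | nil =>
    have hk0 : k = 0 := by simpa using hk
    subst hk0
    simp [intI, PySem.List.enumerate_nil, gapTail]
  | append_singleton cs c ih =>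
    rw [intI_append_singleton]
    by_cases hc : c = '-'
    · subst hc
      simp only [ne_eq, not_true_eq_false, if_false, List.append_nil]
      have hk' : k ≤ (cs.filter (fun c => c ≠ '-')).length := by
        simpa using hk
      rw [foldl_set_append _ _ _
            (fun i hi => mem_intI_bound (List.mem_of_mem_drop hi)),
          ih k hk']
      simp [List.reverse_append, gapTail_dash]
    · simp only [hc, ne_eq, not_false_eq_true, if_true]
      cases k with
      | zero =>
        simp [gapTail]
      | succ k' =>
        have hn : (intI cs).length = (cs.filter (fun c => c ≠ '-')).length := length_intI cs
        have hk' : k' ≤ (cs.filter (fun c => c ≠ '-')).length := by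
          have h1 : (cs ++ [c]).filter (fun x => x ≠ '-') = cs.filter (fun x => x ≠ '-') ++ [c] := by
            rw [List.filter_append]
            congr 1
            simp only [List.filter_cons, List.filter_nil]
            rw [if_pos (by simpa using hc)]
          rw [h1, List.length_append] at hk
          simp only [List.length_cons, List.length_nil] at hk
          omega
        have hdrop : ((intI cs ++ [(cs.length : Int)]).drop
              ((intI cs ++ [(cs.length : Int)]).length - (k' + 1)))
            = (intI cs).drop ((intI cs).length - k') ++ [(cs.length : Int)] := by
          rw [List.length_append]
          simp only [List.length_cons, List.length_nil]
          have hm : (intI cs).length + 1 - (k' + 1) = (intI cs).length - k' := by omega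
          rw [hm, List.drop_append_of_le_length (Nat.sub_le _ _)]
        rw [hdrop, List.foldl_append]
        rw [foldl_set_append _ _ _
            (fun i hi => mem_intI_bound (List.mem_of_mem_drop hi))]
        have hXlen : (((intI cs).drop ((intI cs).length - k')).foldl
            (fun a i => PySem.List.pySetD a i '-') cs).length = cs.length :=
          foldl_set_length _ _
        rw [List.foldl_cons, List.foldl_nil]
        rw [PySem.List.pySetD_of_nonneg _ _ (by omega), List.set_append,
            if_neg (by simp [hXlen])]
        rw [ih k' hk']
        have hrev : (cs ++ [c]).reverse = c :: cs.reverse := by simp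
        rw [hrev]
        simp only [gapTail]
        rw [if_neg hc, List.reverse_cons]
        congr 1
        simp [gapTail_length]

-- ===== VERDICT (by name: the statement is the Claim_ definition above) =====
theorem strip_terminal_stop_in_aligned_seq_spec : Claim_equal_strip_terminal_stop_in_aligned_seq := by
  intro aligned_seq rec_id _hdom hpre
  unfold Spec_strip_terminal_stop_in_aligned_seq
  simp only [strip_terminal_stop_in_aligned_seq, strip_terminal_stop_in_aligned_seq_alt]
  have hA := ungapA (PySem.Str.upper aligned_seq).toList
  have hB := replace_dash (PySem.Str.upper aligned_seq).toList
  rw [hA, hB]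
  have hpre' : ((PySem.Str.upper aligned_seq).toList.filter (fun c => c ≠ '-')).length % 3 = 0 :=
    hpre
  have hne : ¬ (((PySem.Str.upper aligned_seq).toList.filter (fun c => c ≠ '-')).length % 3 ≠ 0) := by
    simpa using hpre'
  rw [if_neg hne, if_neg hne]
  by_cases hc : 3 ≤ ((PySem.Str.upper aligned_seq).toList.filter (fun c => c ≠ '-')).length ∧
      PySem.List.slice ((PySem.Str.upper aligned_seq).toList.filter (fun c => c ≠ '-')) (some (-3)) none ∈ stopCodons
  · rw [if_pos hc, if_pos hc]
    have h3 : PySem.List.slice (intI (PySem.Str.upper aligned_seq).toList) (some (-3)) none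
        = (intI (PySem.Str.upper aligned_seq).toList).drop ((intI (PySem.Str.upper aligned_seq).toList).length - 3) :=
      PySem.List.slice_from_neg_ofNat _ 3 (by omega)
    rw [h3, key _ 3 hc.1]
  · rw [if_neg hc, if_neg hc]
    simp [PySem.Str.upper]
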